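-- pv_equiv track=rewrite | github.com/Juules32/alpos-exam | existing_problems/hill_number.py | is_hill_number
-- ===== SOURCE A (Python) =====
-- def is_hill_number(n_str):
--     n = len(n_str)
--     is_desc = False
--     for i in range(1, n):
--         if n_str[i] > n_str[i - 1]:
--             if is_desc:
--                 return False
--         elif n_str[i] < n_str[i - 1]:
--             is_desc = True
--     return True
-- ===== SOURCE B (Python) =====
-- def is_hill_number(n_str):
--     n = len(n_str)
--     if n <= 1:
--         return True
--     i = 1
--     while i < n and n_str[i] >= n_str[i - 1]:
--         i += 1
--     while i < n and n_str[i] <= n_str[i - 1]: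
--         i += 1
--     return i == n
-- ===== Notes on version B (the rewrite author's own statement) =====
-- stated objective: simpler
-- what changed: Replaces A's single state-flag loop (is_desc boolean with an early return) with two sequential index-advancing phases: consume the non-decreasing prefix, then the non-increasing rest, returning whether the whole string was consumed.
import Mathlib
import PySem

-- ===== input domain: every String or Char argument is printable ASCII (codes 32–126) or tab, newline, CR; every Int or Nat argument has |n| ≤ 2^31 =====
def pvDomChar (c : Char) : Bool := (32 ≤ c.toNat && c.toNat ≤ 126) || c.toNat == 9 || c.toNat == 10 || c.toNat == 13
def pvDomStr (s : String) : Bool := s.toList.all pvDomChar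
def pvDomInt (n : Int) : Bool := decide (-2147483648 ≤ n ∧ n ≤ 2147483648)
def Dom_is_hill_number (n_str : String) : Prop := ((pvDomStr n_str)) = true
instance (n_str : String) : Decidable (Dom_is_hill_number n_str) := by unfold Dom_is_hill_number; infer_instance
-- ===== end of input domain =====

-- ===== PORT A =====
-- B replaces A's single state-flag loop with two sequential scans (non-decreasing
-- prefix, then non-increasing rest); same O(n) cost, simpler decomposition.

-- A's loop: compare each char with the previous one, tracking the is_desc flag,
-- with an early `return False` on an ascent after a descent.
def pvLoopA : Char → List Char → Bool → Bool
  | _, [], _ => true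
  | p, c :: cs, is_desc =>
    if c > p then
      (if is_desc then false else pvLoopA c cs is_desc)
    else if c < p then
      pvLoopA c cs true
    else
      pvLoopA c cs is_desc

def is_hill_number (n_str : String) : Bool :=
  match n_str.toList with
  | [] => true
  | c :: cs => pvLoopA c cs false

-- ===== PORT B =====
-- first while-loop: consume while n_str[i] >= n_str[i-1]; returns (prev, rest)
def pvUp : Char → List Char → Char × List Char
  | p, [] => (p, [])
  | p, c :: cs => if c ≥ p then pvUp c cs else (p, c :: cs)

-- second while-loop: consume while n_str[i] <= n_str[i-1]; `i == n` ⇔ all consumed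
def pvDown : Char → List Char → Bool
  | _, [] => true
  | p, c :: cs => if c ≤ p then pvDown c cs else false

def is_hill_number_alt (n_str : String) : Bool :=
  match n_str.toList with
  | [] => true
  | c :: cs =>
    let pr := pvUp c cs
    pvDown pr.1 pr.2

-- ===== PRECONDITION & SPEC =====
def Spec_is_hill_number (n_str : String) (out : Bool) : Prop := out = is_hill_number_alt n_str
instance (n_str : String) (out : Bool) : Decidable (Spec_is_hill_number n_str out) := by unfold Spec_is_hill_number; infer_instance

-- ===== CLAIM (what is proved, stated in full; the proofs are below) =====
def Claim_equal_is_hill_number : Prop := ∀ (n_str : String), Dom_is_hill_number n_str → Spec_is_hill_number n_str (is_hill_number n_str)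

-- ===== LEMMAS AND PROOFS =====

theorem pvLoopA_true_eq_down (cs : List Char) : ∀ p, pvLoopA p cs true = pvDown p cs := by
  induction cs with
  | nil => intro p; rfl
  | cons c cs ih =>
    intro p
    simp only [pvLoopA, pvDown]
    rcases lt_trichotomy c p with h | h | h
    · rw [if_neg (by exact not_lt.mpr h.le), if_pos h, if_pos h.le, ih]
    · subst h; rw [if_neg (lt_irrefl c), if_neg (lt_irrefl c), if_pos le_rfl, ih]
    · rw [if_pos h, if_pos trivial, if_neg (by exact not_le.mpr h)]

theorem pvLoopA_false_eq_alt (cs : List Char) :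
    ∀ p, pvLoopA p cs false = pvDown (pvUp p cs).1 (pvUp p cs).2 := by
  induction cs with
  | nil => intro p; rfl
  | cons c cs ih =>
    intro p
    simp only [pvLoopA, pvUp]
    rcases lt_trichotomy c p with h | h | h
    · rw [if_neg (by exact not_lt.mpr h.le), if_pos h, if_neg (by exact not_le.mpr h),
        pvLoopA_true_eq_down]
      simp only [pvDown, if_pos h.le]
    · subst h; rw [if_neg (lt_irrefl c), if_neg (lt_irrefl c), if_pos le_rfl, ih]
    · rw [if_pos h, if_neg (by exact Bool.false_ne_true), if_pos h.le, ih]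

-- ===== VERDICT (by name: the statement is the Claim_ definition above) =====
theorem is_hill_number_spec : Claim_equal_is_hill_number := by
  intro n_str _
  show is_hill_number n_str = is_hill_number_alt n_str
  unfold is_hill_number is_hill_number_alt
  cases n_str.toList with
  | nil => rfl
  | cons c cs => exact pvLoopA_false_eq_alt cs c
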